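-- pv_equiv track=rewrite | github.com/aring87/ringforge-workbench | static_triage_engine/scoring.py | _filter_domains
-- ===== SOURCE A (Python) =====
-- KNOWN_BENIGN_DOMAIN_SUFFIXES = {
--     "digicert.com", "ocsp.digicert.com", "crl3.digicert.com", "crl4.digicert.com", "cacerts.digicert.com",
-- }
--
-- def _filter_domains(domains: list[str]) -> list[str]:
--     out: list[str] = []
--     for d in domains:
--         dd = d.strip().lower().strip(".")
--         if not dd:
--             continue
--         if any(dd == sfx or dd.endswith("." + sfx) for sfx in KNOWN_BENIGN_DOMAIN_SUFFIXES):
--             continue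
--         out.append(dd)
--     return sorted(set(out))
-- ===== SOURCE B (Python) =====
-- KNOWN_BENIGN_DOMAIN_SUFFIXES = {
--     "digicert.com", "ocsp.digicert.com", "crl3.digicert.com", "crl4.digicert.com", "cacerts.digicert.com",
-- }
--
-- def _filter_domains(domains: list[str]) -> list[str]:
--     def _is_benign(dd: str) -> bool:
--         # benign iff the whole domain, or the part after some dot, is a known suffix
--         return dd in KNOWN_BENIGN_DOMAIN_SUFFIXES or any(
--             dd[i] == "." and dd[i + 1:] in KNOWN_BENIGN_DOMAIN_SUFFIXES
--             for i in range(len(dd))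
--         )
--     cleaned = (d.strip().lower().strip(".") for d in domains)
--     return sorted({dd for dd in cleaned if dd and not _is_benign(dd)})
-- ===== Notes on version B (the rewrite author's own statement) =====
-- stated objective: alternative
-- what changed: The benign test now generates the domain's own dot-boundary suffixes and checks each for membership in the constant set, instead of looping over the five benign constants with ==/endswith; normalization becomes a generator and the kept set is built by a set comprehension and sorted once.
import Mathlib
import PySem

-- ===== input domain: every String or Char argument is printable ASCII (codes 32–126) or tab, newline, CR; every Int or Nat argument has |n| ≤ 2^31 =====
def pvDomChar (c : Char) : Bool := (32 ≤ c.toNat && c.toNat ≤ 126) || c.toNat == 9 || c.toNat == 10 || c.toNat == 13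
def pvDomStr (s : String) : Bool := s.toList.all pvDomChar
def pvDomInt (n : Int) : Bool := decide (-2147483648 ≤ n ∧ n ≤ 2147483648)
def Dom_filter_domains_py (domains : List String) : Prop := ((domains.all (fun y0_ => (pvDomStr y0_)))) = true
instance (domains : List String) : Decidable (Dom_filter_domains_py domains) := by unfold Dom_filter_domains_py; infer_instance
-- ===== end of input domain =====

-- B replaces the ==/endswith scan over the five benign constants by generating the
-- domain's own dot-boundary suffixes and testing membership in the constant set
-- (objective: alternative, same practical cost).

-- shared module constant KNOWN_BENIGN_DOMAIN_SUFFIXES (a Python set)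
def KNOWN_BENIGN : PySem.Set String :=
  PySem.Set.ofList ["digicert.com", "ocsp.digicert.com", "crl3.digicert.com",
                    "crl4.digicert.com", "cacerts.digicert.com"]

-- ===== PORT A =====
def filter_domains_py (domains : List String) : List String :=
  let out := domains.foldl (fun out d =>
    let dd := PySem.Str.stripChars (PySem.Str.lower (PySem.Str.strip d)) "."
    if dd == "" then out
    else if KNOWN_BENIGN.any (fun sfx => dd == sfx || PySem.Str.endswith dd ("." ++ sfx)) then out
    else out ++ [dd]) []
  PySem.List.sorted (PySem.Set.ofList out) (fun x => x) false

-- ===== PORT B =====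
-- any(dd[i] == "." and dd[i+1:] in KNOWN_BENIGN_DOMAIN_SUFFIXES for i in range(len(dd)))
def pvBenignTail : List Char → Bool
  | [] => false
  | c :: rest => (c == '.' && PySem.Set.contains KNOWN_BENIGN (String.ofList rest)) || pvBenignTail rest

def pvIsBenign (dd : String) : Bool :=
  PySem.Set.contains KNOWN_BENIGN dd || pvBenignTail dd.toList

def filter_domains_py_alt (domains : List String) : List String :=
  let cleaned := domains.map (fun d => PySem.Str.stripChars (PySem.Str.lower (PySem.Str.strip d)) ".")
  PySem.List.sorted
    (PySem.Set.ofList (cleaned.filter (fun dd => !(dd == "") && !pvIsBenign dd)))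
    (fun x => x) false

-- ===== PRECONDITION & SPEC =====
def Spec_filter_domains_py (domains : List String) (out : List String) : Prop := out = filter_domains_py_alt domains
instance (domains : List String) (out : List String) : Decidable (Spec_filter_domains_py domains out) := by unfold Spec_filter_domains_py; infer_instance

-- ===== CLAIM (what is proved, stated in full; the proofs are below) =====
def Claim_equal_filter_domains_py : Prop := ∀ (domains : List String), Dom_filter_domains_py domains → Spec_filter_domains_py domains (filter_domains_py domains)

-- ===== LEMMAS AND PROOFS =====

theorem pvBenignTail_iff (cs : List Char) :
    pvBenignTail cs = true ↔
      ∃ t, ('.' :: t) <:+ cs ∧ PySem.Set.contains KNOWN_BENIGN (String.ofList t) = true := by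
  induction cs with
  | nil => simp [pvBenignTail]
  | cons c rest ih =>
    simp only [pvBenignTail, Bool.or_eq_true, Bool.and_eq_true, beq_iff_eq, ih]
    constructor
    · rintro (⟨hc, hmem⟩ | ⟨t, hsfx, hmem⟩)
      · exact ⟨rest, by simp [hc], hmem⟩
      · exact ⟨t, hsfx.trans (List.suffix_cons c rest), hmem⟩
    · rintro ⟨t, hsfx, hmem⟩
      rcases List.suffix_cons_iff.mp hsfx with h | h
      · obtain ⟨hc, hr⟩ := List.cons.inj h
        exact Or.inl ⟨hc.symm, hr ▸ hmem⟩
      · exact Or.inr ⟨t, h, hmem⟩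

theorem benign_eq (dd : String) :
    (KNOWN_BENIGN.any (fun sfx => dd == sfx || PySem.Str.endswith dd ("." ++ sfx))) = pvIsBenign dd := by
  rw [Bool.eq_iff_iff, pvIsBenign]
  simp only [List.any_eq_true, Bool.or_eq_true, beq_iff_eq, pvBenignTail_iff,
    PySem.Set.contains_iff, PySem.Str.endswith_eq, PySem.Chars.endswith_iff,
    String.toList_append]
  constructor
  · rintro ⟨sfx, hmem, hdd | hsfx⟩
    · exact Or.inl (hdd ▸ hmem)
    · refine Or.inr ⟨sfx.toList, ?_, by simpa using hmem⟩
      simpa using hsfx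
  · rintro (hdd | ⟨t, hsfx, hmem⟩)
    · exact ⟨dd, hdd, Or.inl rfl⟩
    · refine ⟨String.ofList t, hmem, Or.inr ?_⟩
      simpa using hsfx

theorem filter_domains_eq (domains : List String) :
    filter_domains_py domains = filter_domains_py_alt domains := by
  have hbody : ∀ (acc : List String) (d : String), d ∈ domains →
      (let dd := PySem.Str.stripChars (PySem.Str.lower (PySem.Str.strip d)) "."
       if dd == "" then acc
       else if KNOWN_BENIGN.any (fun sfx => dd == sfx || PySem.Str.endswith dd ("." ++ sfx)) then acc
       else acc ++ [dd]) =
      (if (fun d : String =>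
            let dd := PySem.Str.stripChars (PySem.Str.lower (PySem.Str.strip d)) "."
            !(dd == "") && !pvIsBenign dd) d = true
       then acc ++ [PySem.Str.stripChars (PySem.Str.lower (PySem.Str.strip d)) "."] else acc) := by
    intro acc d _
    simp only [← benign_eq]
    cases hq : (PySem.Str.stripChars (PySem.Str.lower (PySem.Str.strip d)) "." == "") <;>
      cases ha : KNOWN_BENIGN.any (fun sfx =>
          PySem.Str.stripChars (PySem.Str.lower (PySem.Str.strip d)) "." == sfx ||
          PySem.Str.endswith (PySem.Str.stripChars (PySem.Str.lower (PySem.Str.strip d)) ".")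
            ("." ++ sfx)) <;>
      simp_all
  have hout : domains.foldl (fun out d =>
      let dd := PySem.Str.stripChars (PySem.Str.lower (PySem.Str.strip d)) "."
      if dd == "" then out
      else if KNOWN_BENIGN.any (fun sfx => dd == sfx || PySem.Str.endswith dd ("." ++ sfx)) then out
      else out ++ [dd]) [] =
      (domains.map (fun d => PySem.Str.stripChars (PySem.Str.lower (PySem.Str.strip d)) ".")).filter
        (fun dd => !(dd == "") && !pvIsBenign dd) := by
    rw [PySem.List.foldl_congr_mem _ _ _ _ hbody, PySem.List.foldl_append_if]
    simp only [List.filter_map, Function.comp_def, List.nil_append]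
  show PySem.List.sorted (PySem.Set.ofList (domains.foldl (fun out d =>
      let dd := PySem.Str.stripChars (PySem.Str.lower (PySem.Str.strip d)) "."
      if dd == "" then out
      else if KNOWN_BENIGN.any (fun sfx => dd == sfx || PySem.Str.endswith dd ("." ++ sfx)) then out
      else out ++ [dd]) [])) (fun x => x) false = _
  rw [hout]
  rfl

-- ===== VERDICT (by name: the statement is the Claim_ definition above) =====
theorem filter_domains_py_spec : Claim_equal_filter_domains_py := by
  intro domains _
  unfold Spec_filter_domains_py
  exact filter_domains_eq domains
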